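-- pv_equiv track=rewrite | github.com/ricpadil17/web_crawler | web_crawler.py | create_word_dicts
-- ===== SOURCE A (Python) =====
-- def create_word_dicts(corpus):
--     total_words = []
--     word_dicts = []
--     # create one long string from the corpus of unique invidivual words:
--     for document in corpus:
--         words = document.split()
--         for word in words:
--             if word not in total_words:
--                 total_words.append(word)
--
--     # creates a dictionary of unique words in the corpus and their occurences in each document
--     for idx, document in enumerate(corpus):
--         word_dicts.append(dict.fromkeys(total_words, 0))
--         doc_words = document.split()
--         for word in doc_words:
--             word_dicts[idx][word]+=1
--     return word_dicts
-- ===== SOURCE B (Python) =====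
-- def create_word_dicts(corpus):
--     # tokenize once, dedup the concatenated words via dict.fromkeys,
--     # and count by list.count per vocabulary word -- no increment loop at all
--     docs = [document.split() for document in corpus]
--     vocab = list(dict.fromkeys([w for ws in docs for w in ws]))
--     return [{w: ws.count(w) for w in vocab} for ws in docs]
-- ===== Notes on version B (the rewrite author's own statement) =====
-- stated objective: idiomatic
-- what changed: B tokenizes each document once, builds the vocabulary with dict.fromkeys over the concatenated token lists instead of A's 'word not in total_words' membership scans, and fills each output dict by list.count per vocabulary word instead of A's fromkeys-then-increment mutation loop - there is no incremental counting at all.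
import Mathlib
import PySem

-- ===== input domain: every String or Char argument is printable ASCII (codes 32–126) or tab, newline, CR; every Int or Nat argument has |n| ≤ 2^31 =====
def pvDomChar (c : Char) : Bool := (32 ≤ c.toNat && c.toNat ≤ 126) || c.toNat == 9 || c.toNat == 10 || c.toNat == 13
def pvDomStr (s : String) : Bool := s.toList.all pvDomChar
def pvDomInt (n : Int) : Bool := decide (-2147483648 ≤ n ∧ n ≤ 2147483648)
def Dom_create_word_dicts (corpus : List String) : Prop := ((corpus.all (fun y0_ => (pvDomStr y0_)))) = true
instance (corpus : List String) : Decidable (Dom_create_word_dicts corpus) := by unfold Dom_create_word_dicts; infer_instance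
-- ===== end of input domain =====

-- B tokenizes each document once, deduplicates the concatenated token lists with dict.fromkeys, and
-- fills each output dict by list.count per vocabulary word — instead of A's `word not in total_words`
-- membership scans and fromkeys-then-increment mutation; different decomposition, same cost.

-- ===== PORT A =====
-- `word_dicts[idx][word] += 1` mutates the dict appended in this very iteration (idx is always the
-- last position), so it is ported as updating the local dict before appending it; dicts are returned
-- as their items lists (assoc lists in insertion order), per the type convention.
def pvA_total_words (corpus : List String) : List String :=
  corpus.foldl (fun tw document =>
    (PySem.Str.split₀ document).foldl
      (fun tw word => if word ∈ tw then tw else tw ++ [word]) tw) []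

def pvA_doc_dict (total_words : List String) (document : String) : PySem.Dict String Int :=
  (PySem.Str.split₀ document).foldl (fun d word => d.modify word 0 (· + 1))
    (total_words.foldl (fun d w => d.insert w 0) PySem.Dict.empty)

def create_word_dicts (corpus : List String) : List (List (String × Int)) :=
  (corpus.foldl (fun wds document => wds ++ [pvA_doc_dict (pvA_total_words corpus) document])
    []).map (fun d => d.items)

-- ===== PORT B =====
def create_word_dicts_alt (corpus : List String) : List (List (String × Int)) :=
  let docs := corpus.map (fun document => PySem.Str.split₀ document)
  let vocab := PySem.List.dedup (docs.flatMap (fun ws => ws))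
  docs.map (fun ws =>
    (vocab.foldl (fun d w => d.insert w (PySem.List.count ws w)) PySem.Dict.empty).items)

-- ===== PRECONDITION & SPEC =====
def Spec_create_word_dicts (corpus : List String) (out : List (List (String × Int))) : Prop := out = create_word_dicts_alt corpus
instance (corpus : List String) (out : List (List (String × Int))) : Decidable (Spec_create_word_dicts corpus out) := by unfold Spec_create_word_dicts; infer_instance

-- ===== CLAIM (what is proved, stated in full; the proofs are below) =====
def Claim_equal_create_word_dicts : Prop := ∀ (corpus : List String), Dom_create_word_dicts corpus → Spec_create_word_dicts corpus (create_word_dicts corpus)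

-- ===== LEMMAS AND PROOFS =====

-- all words of the corpus, in document order
def pvAllWords (corpus : List String) : List String :=
  corpus.flatMap (fun d => PySem.Str.split₀ d)

-- A's inner `if word not in total_words: append` loop is Set.update
lemma pvDedupLoop_eq_update (ws tw : List String) :
    ws.foldl (fun tw word => if word ∈ tw then tw else tw ++ [word]) tw
      = PySem.Set.update tw ws := by
  have hf : (fun (tw : List String) (word : String) =>
      if word ∈ tw then tw else tw ++ [word]) = fun tw word => PySem.Set.add tw word := by
    funext s x; rw [PySem.Set.add_eq_ite]
  rw [hf]; rfl

-- folding Set.update over documents is one Set.update over all words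
lemma pvVocabFold (corpus : List String) (tw : List String) :
    corpus.foldl (fun tw doc => PySem.Set.update tw (PySem.Str.split₀ doc)) tw
      = PySem.Set.update tw (pvAllWords corpus) := by
  induction corpus generalizing tw with
  | nil => simp [pvAllWords, PySem.Set.update_nil]
  | cons d cs ih =>
      rw [List.foldl_cons, ih]
      have : pvAllWords (d :: cs) = PySem.Str.split₀ d ++ pvAllWords cs := by
        simp [pvAllWords]
      rw [this, PySem.Set.update_append]

lemma pvA_total_words_eq (corpus : List String) :
    pvA_total_words corpus = PySem.Set.ofList (pvAllWords corpus) := by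
  unfold pvA_total_words
  simp only [pvDedupLoop_eq_update]
  rw [pvVocabFold]
  exact PySem.Set.update_empty _

-- fromkeys(V, 0) looks up to 0 everywhere
lemma pvGetDZero (V : List String) (d : PySem.Dict String Int) (k : String)
    (h : d.getD k 0 = 0) :
    (V.foldl (fun d w => d.insert w 0) d).getD k 0 = 0 := by
  induction V generalizing d with
  | nil => exact h
  | cons w V ih =>
      rw [List.foldl_cons]
      refine ih _ ?_
      rw [PySem.Dict.getD_insert]
      split_ifs <;> simp [h]

-- the vocabulary contains every word of a member document, so updating by it adds nothing
lemma pvUpdate_of_sub (ws V : List String) (hsub : ∀ w ∈ ws, w ∈ V) :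
    PySem.Set.update V ws = V := by
  rw [PySem.Set.update_eq_append_filter]
  have : List.filter (fun y => !PySem.Set.contains V y) (PySem.Set.ofList ws) = [] := by
    refine List.filter_eq_nil_iff.mpr ?_
    intro a ha
    simp only [Bool.not_eq_eq_eq_not, Bool.not_true, Bool.not_eq_false, PySem.Set.contains_iff]
    exact hsub a ((PySem.Set.mem_ofList ws a).mp ha)
  rw [this, List.append_nil]

-- A's per-document dict: items are (w, count of w in the document) over the vocabulary
lemma pvItemsA (ws V : List String) (hnd : V.Nodup) (hsub : ∀ w ∈ ws, w ∈ V) :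
    (ws.foldl (fun d word => d.modify word 0 (· + 1))
        (V.foldl (fun d w => d.insert w 0) PySem.Dict.empty)).items
      = V.map (fun w => (w, (List.count w ws : Int))) := by
  set d0 : PySem.Dict String Int := V.foldl (fun d w => d.insert w 0) PySem.Dict.empty with hd0
  have hkeys0 : d0.keys = V := by
    rw [hd0, show (fun (d : PySem.Dict String Int) (w : String) => d.insert w 0)
          = (fun d w => d.insert w ((fun _ _ => (0 : Int)) d w)) from rfl,
      PySem.Dict.keys_foldl_insert, PySem.Dict.keys_empty,
      show PySem.Set.update ([] : List String) V = PySem.Set.empty.update V from rfl,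
      PySem.Set.update_empty]
    exact PySem.Set.ofList_eq_self_of_nodup V hnd
  set dA : PySem.Dict String Int :=
    ws.foldl (fun d word => d.modify word 0 (· + 1)) d0 with hdA
  have hkeys : dA.keys = V := by
    rw [hdA, show (fun (d : PySem.Dict String Int) (word : String) => d.modify word 0 (· + 1))
          = (fun d word => d.modify word 0 ((fun _ _ => (· + (1 : Int))) d word)) from rfl,
      PySem.Dict.keys_foldl_modify, hkeys0]
    exact pvUpdate_of_sub ws V hsub
  rw [PySem.Dict.items_eq_map_keys dA (hkeys ▸ hnd) 0, hkeys]
  refine List.map_congr_left ?_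
  intro w _
  have hmod : dA.getD w 0 = d0.getD w 0 + (List.count w ws : Int) := by
    rw [hdA]; exact PySem.Dict.getD_foldl_modify_add_one ws d0 w
  have h0 : d0.getD w 0 = 0 := by
    rw [hd0]; exact pvGetDZero V PySem.Dict.empty w (by simp [PySem.Dict.getD_empty])
  rw [hmod, h0, zero_add]

-- B's assembled dict: items are (w, count) over the vocabulary
lemma pvItemsB (V : List String) (hnd : V.Nodup) (ws : List String) :
    (V.foldl (fun d w => d.insert w ((PySem.List.count ws w : Int))) PySem.Dict.empty).items
      = V.map (fun w => (w, (PySem.List.count ws w : Int))) := by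
  have := PySem.Dict.items_foldl_insert_fresh V (fun w => w) (fun w => (PySem.List.count ws w : Int))
    PySem.Dict.empty (fun a _ => PySem.Dict.contains_empty a) (by simpa using hnd)
  simpa using this

-- ===== VERDICT (by name: the statement is the Claim_ definition above) =====
theorem create_word_dicts_spec : Claim_equal_create_word_dicts := by
  unfold Claim_equal_create_word_dicts Spec_create_word_dicts
  intro corpus _
  unfold create_word_dicts create_word_dicts_alt
  rw [PySem.List.foldl_append_singleton_eq_map (fun document =>
        pvA_doc_dict (pvA_total_words corpus) document) corpus []]
  simp only [List.nil_append, List.map_map, PySem.List.dedup_eq_ofList]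
  have hflat : (corpus.map (fun document => PySem.Str.split₀ document)).flatMap (fun ws => ws)
      = pvAllWords corpus := by
    simp [pvAllWords, List.flatMap_map]
  rw [hflat]
  refine List.map_congr_left ?_
  intro doc hdoc
  simp only [Function.comp_apply]
  have hnd : (PySem.Set.ofList (pvAllWords corpus)).Nodup := PySem.Set.nodup_ofList _
  have hsub : ∀ w ∈ PySem.Str.split₀ doc, w ∈ PySem.Set.ofList (pvAllWords corpus) := by
    intro w hw
    rw [PySem.Set.mem_ofList]
    exact List.mem_flatMap.mpr ⟨doc, hdoc, hw⟩
  show (pvA_doc_dict (pvA_total_words corpus) doc).items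
      = ((PySem.Set.ofList (pvAllWords corpus)).foldl
          (fun d w => d.insert w ((PySem.List.count (PySem.Str.split₀ doc) w : Int))) PySem.Dict.empty).items
  rw [pvItemsB _ hnd, pvA_doc_dict, pvA_total_words_eq,
    pvItemsA (PySem.Str.split₀ doc) _ hnd hsub]
  refine List.map_congr_left ?_
  intro w _
  simp [PySem.List.count_eq]
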